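-- pv_equiv track=rewrite | github.com/Voluptatemn/ThacherDSA | SA6/problem_3.py | numOfBuildings
-- ===== SOURCE A (Python) =====
-- def numOfBuildings(array):
--     map = {}
--
--     for i in array:
--         for j in range (len(i)):
--             if j not in map:
--                 map[j] = [i[j], 1]
--             else:
--                 if map[j][0] < i[j]:
--                     map[j][0] = i[j]
--                     map[j][1] = map[j][1] + 1
--
--     soln = []
--     for i in map:
--         soln.append(map[i][1])
--
--     return soln
-- ===== SOURCE B (Python) =====
-- def numOfBuildings(array):
--     max_cols = max((len(r) for r in array), default=0)
--     soln = []
--     for c in range(max_cols):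
--         count = 0
--         running = None
--         for r in array:
--             if len(r) > c:
--                 if running is None:
--                     running = r[c]
--                     count = 1
--                 elif r[c] > running:
--                     running = r[c]
--                     count += 1
--         soln.append(count)
--     return soln
-- ===== Notes on version B (the rewrite author's own statement) =====
-- stated objective: simpler
-- what changed: Replaced A's row-major single pass that accumulates a dict from column index to [running max, count] with a direct column-major traversal: compute the maximum row length, then for each column scan the rows that reach that column, counting strict running-max increases; no dict is built.
import Mathlib
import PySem

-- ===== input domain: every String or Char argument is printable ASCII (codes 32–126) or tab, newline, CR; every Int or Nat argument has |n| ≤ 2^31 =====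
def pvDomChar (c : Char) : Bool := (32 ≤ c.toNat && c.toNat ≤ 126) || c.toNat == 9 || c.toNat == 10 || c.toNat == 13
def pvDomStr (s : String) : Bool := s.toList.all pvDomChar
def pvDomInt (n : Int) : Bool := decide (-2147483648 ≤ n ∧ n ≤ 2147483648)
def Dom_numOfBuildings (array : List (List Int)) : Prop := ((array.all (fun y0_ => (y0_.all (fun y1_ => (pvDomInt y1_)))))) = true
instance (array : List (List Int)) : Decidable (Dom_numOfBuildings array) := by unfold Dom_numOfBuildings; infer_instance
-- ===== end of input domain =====

-- B replaces A's row-major pass over a dict (column ↦ [running max, count]) by a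
-- column-major traversal with a plain running max and counter per column (objective: simpler).

-- ===== PORT A =====
def numOfBuildings (array : List (List Int)) : List Int :=
  let m : PySem.Dict Int (Int × Int) :=
    array.foldl (fun d i =>
      (PySem.List.pyRange 0 (i.length : Int) 1).foldl (fun d j =>
        match d.get? j with
        | none => d.insert j (PySem.List.pyGetD i j 0, 1)
        | some p =>
          if p.1 < PySem.List.pyGetD i j 0 then
            d.insert j (PySem.List.pyGetD i j 0, p.2 + 1)
          else d) d) PySem.Dict.empty
  m.keys.foldl (fun soln k => soln ++ [(m.getD k (0, 0)).2]) []

-- ===== PORT B =====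
def numOfBuildings_alt (array : List (List Int)) : List Int :=
  let maxCols : Int :=
    (PySem.List.max? (array.map (fun r => (r.length : Int))) (fun x => x)).getD 0
  (PySem.List.pyRange 0 maxCols 1).map (fun c =>
    (array.foldl (fun (st : Option Int × Int) r =>
        if c < (r.length : Int) then
          match st.1 with
          | none => (some (PySem.List.pyGetD r c 0), 1)
          | some m =>
            if m < PySem.List.pyGetD r c 0 then (some (PySem.List.pyGetD r c 0), st.2 + 1) else st
        else st) ((none : Option Int), (0 : Int))).2)

-- ===== PRECONDITION & SPEC =====
def Spec_numOfBuildings (array : List (List Int)) (out : List Int) : Prop := out = numOfBuildings_alt array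
instance (array : List (List Int)) (out : List Int) : Decidable (Spec_numOfBuildings array out) := by unfold Spec_numOfBuildings; infer_instance

-- ===== CLAIM (what is proved, stated in full; the proofs are below) =====
def Claim_equal_numOfBuildings : Prop := ∀ (array : List (List Int)), Dom_numOfBuildings array → Spec_numOfBuildings array (numOfBuildings array)

-- ===== LEMMAS AND PROOFS =====

def pvStep (st : Option (Int × Int)) (v : Int) : Int × Int :=
  match st with
  | none => (v, 1)
  | some p => if p.1 < v then (v, p.2 + 1) else p

def pvExt (f : Nat → Int × Int) (M : Nat) (c : Nat) : Option (Int × Int) :=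
  if c < M then some (f c) else none

def pvCanon (M : Nat) (f : Nat → Int × Int) : PySem.Dict Int (Int × Int) :=
  PySem.Dict.mk ((List.range M).map (fun (c : Nat) => ((c : Int), f c)))

def pvCol (c : Nat) (rows : List (List Int)) (st : Option (Int × Int)) : Option (Int × Int) :=
  rows.foldl (fun st r => if c < r.length then some (pvStep st (PySem.List.pyGetD r (c : Int) 0)) else st) st

def pvMaxLen : List (List Int) → Nat
  | [] => 0
  | r :: t => max r.length (pvMaxLen t)

def pvInner (d : PySem.Dict Int (Int × Int)) (i : List Int) : PySem.Dict Int (Int × Int) :=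
  (PySem.List.pyRange 0 (i.length : Int) 1).foldl (fun d j =>
    match d.get? j with
    | none => d.insert j (PySem.List.pyGetD i j 0, 1)
    | some p =>
      if p.1 < PySem.List.pyGetD i j 0 then
        d.insert j (PySem.List.pyGetD i j 0, p.2 + 1)
      else d) d

def pvConv (st : Option (Int × Int)) : Option Int × Int :=
  match st with
  | none => (none, 0)
  | some p => (some p.1, p.2)

theorem pv_get?_mk_append (l1 l2 : List (Int × (Int × Int))) (x : Int) :
    (PySem.Dict.mk (l1 ++ l2)).get? x = ((PySem.Dict.mk l1).get? x).or ((PySem.Dict.mk l2).get? x) := by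
  induction l1 with
  | nil => simp [PySem.Dict.get?]
  | cons p t ih =>
    obtain ⟨k, v⟩ := p
    simp only [List.cons_append, PySem.Dict.get?_mk_cons]
    split <;> simp [ih]

theorem pvCanon_congr {M : Nat} {f g : Nat → Int × Int} (h : ∀ c < M, f c = g c) :
    pvCanon M f = pvCanon M g := by
  unfold pvCanon
  congr 1
  exact List.map_congr_left (fun c hc => by rw [h c (List.mem_range.mp hc)])

theorem pvCanon_get? (M : Nat) (f : Nat → Int × Int) (j : Int) :
    (pvCanon M f).get? j = if 0 ≤ j ∧ j.toNat < M then some (f j.toNat) else none := by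
  induction M with
  | zero => simp [pvCanon, PySem.Dict.get?]
  | succ M ih =>
    unfold pvCanon
    rw [List.range_succ, List.map_append]
    rw [pv_get?_mk_append]
    unfold pvCanon at ih
    rw [ih]
    simp only [List.map_cons, List.map_nil, PySem.Dict.get?_mk_cons]
    by_cases h1 : 0 ≤ j ∧ j.toNat < M
    · rw [if_pos h1, if_pos (⟨h1.1, Nat.lt_succ_of_lt h1.2⟩ : 0 ≤ j ∧ j.toNat < M + 1)]
      simp
    · rw [if_neg h1, Option.none_or]
      by_cases h2 : (M : Int) = j
      · have hj : 0 ≤ j := h2 ▸ Int.natCast_nonneg M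
        have : j.toNat = M := by omega
        simp [h2, this, hj]
      · have : ((M : Int) == j) = false := by simp [h2]
        rw [this]
        simp only [Bool.false_eq_true, if_false]
        rw [if_neg]
        · simp [PySem.Dict.get?]
        · intro hc; apply h1; constructor
          · exact hc.1
          · rcases Nat.lt_succ_iff_lt_or_eq.mp hc.2 with h | h
            · exact h
            · exfalso; apply h2; omega

theorem pvCanon_keys (M : Nat) (f : Nat → Int × Int) :
    (pvCanon M f).keys = (List.range M).map (fun (c : Nat) => (c : Int)) := by
  simp [pvCanon, PySem.Dict.keys_mk, List.map_map]

theorem pvCanon_contains (M : Nat) (f : Nat → Int × Int) (c : Nat) :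
    (pvCanon M f).contains (c : Int) = decide (c < M) := by
  rw [PySem.Dict.contains_eq_isSome_get?, pvCanon_get?]
  by_cases h : c < M
  · rw [if_pos (by simpa using h)]; simp [h]
  · rw [if_neg (by simpa using h)]; simp [h]

theorem pvCanon_insert_of_lt (M : Nat) (f : Nat → Int × Int) (c : Nat) (hc : c < M) (v : Int × Int) :
    (pvCanon M f).insert (c : Int) v = pvCanon M (fun x => if x = c then v else f x) := by
  apply PySem.Dict.ext
  rw [PySem.Dict.items_insert_of_contains _ v (by rw [pvCanon_contains]; simpa using hc)]
  show List.map _ ((List.range M).map _) = (List.range M).map _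
  rw [List.map_map]
  apply List.map_congr_left
  intro x hx
  by_cases hxc : x = c
  · subst hxc; simp
  · simp [hxc]

theorem pvCanon_insert_new (M : Nat) (f : Nat → Int × Int) (v : Int × Int) :
    (pvCanon M f).insert (M : Int) v = pvCanon (M + 1) (fun x => if x = M then v else f x) := by
  apply PySem.Dict.ext
  rw [PySem.Dict.items_insert_of_not_contains _ v (by rw [pvCanon_contains]; simp)]
  show (List.range M).map _ ++ _ = (List.range (M+1)).map _
  rw [List.range_succ, List.map_append]
  congr 1
  · apply List.map_congr_left
    intro x hx
    have : x ≠ M := Nat.ne_of_lt (List.mem_range.mp hx)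
    simp [this]
  · simp

theorem pvInner_aux (r : List Int) (n : Nat) (M : Nat) (f : Nat → Int × Int) :
    (PySem.List.pyRange 0 (n : Int) 1).foldl (fun d j =>
      match d.get? j with
      | none => d.insert j (PySem.List.pyGetD r j 0, 1)
      | some p =>
        if p.1 < PySem.List.pyGetD r j 0 then
          d.insert j (PySem.List.pyGetD r j 0, p.2 + 1)
        else d) (pvCanon M f) =
      pvCanon (max M n)
        (fun c => if c < n then pvStep (pvExt f M c) (PySem.List.pyGetD r (c : Int) 0) else f c) := by
  induction n with
  | zero =>
    rw [show ((0:Nat):Int) = 0 from rfl, PySem.List.pyRange_one_eq_nil le_rfl]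
    simp only [List.foldl_nil, Nat.max_zero]
    exact pvCanon_congr (fun c hc => by simp)
  | succ n ih =>
    rw [show ((n+1:Nat):Int) = (n:Int)+1 by push_cast; ring,
        PySem.List.pyRange_one_succ_right (by positivity), List.foldl_append]
    rw [ih]
    simp only [List.foldl_cons, List.foldl_nil]
    rw [pvCanon_get?]
    have htn : ((n:Int)).toNat = n := by simp
    by_cases hM : n < M
    · have h1 : (0:Int) ≤ (n:Int) ∧ ((n:Int)).toNat < max M n := by
        constructor
        · positivity
        · rw [htn]; omega
      rw [if_pos h1]
      simp only [htn, lt_irrefl, if_false]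
      have hmax1 : max M n = M := by omega
      have hmax2 : max M (n+1) = M := by omega
      by_cases hlt : (f n).1 < PySem.List.pyGetD r (n:Int) 0
      · rw [if_pos hlt, hmax1, pvCanon_insert_of_lt M _ n hM]
        rw [hmax2]
        apply pvCanon_congr
        intro c hc
        by_cases hcn : c = n
        · subst hcn
          simp only [pvStep, pvExt]
          split_ifs <;> first | rfl | omega | simp_all
        · rcases Nat.lt_or_ge c n with h | h
          · simp [hcn, h, Nat.lt_succ_of_lt h]
          · have hc1 : ¬ c < n := by omega
            have hc2 : ¬ c < n + 1 := by omega
            simp [hcn, hc1, hc2]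
      · rw [if_neg hlt, hmax1, hmax2]
        apply pvCanon_congr
        intro c hc
        by_cases hcn : c = n
        · subst hcn
          simp only [pvStep, pvExt]
          split_ifs <;> first | rfl | omega | simp_all
        · rcases Nat.lt_or_ge c n with h | h
          · simp [h, Nat.lt_succ_of_lt h]
          · have hc1 : ¬ c < n := by omega
            have hc2 : ¬ c < n + 1 := by omega
            simp [hc1, hc2]
    · have hmax1 : max M n = n := by omega
      have hmax2 : max M (n+1) = n+1 := by omega
      rw [if_neg (by rw [htn]; omega)]
      rw [hmax1]
      rw [show ((n:Int)) = ((n:Nat):Int) from rfl, pvCanon_insert_new n _ _]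
      rw [hmax2]
      apply pvCanon_congr
      intro c hc
      by_cases hcn : c = n
      · subst hcn
        simp only [pvStep, pvExt]
        split_ifs <;> rfl
      · rcases Nat.lt_or_ge c n with h | h
        · simp [hcn, h, Nat.lt_succ_of_lt h]
        · have hc1 : ¬ c < n := by omega
          have hc2 : ¬ c < n + 1 := by omega
          simp [hcn, hc1, hc2]

theorem pvInner_canon (r : List Int) (M : Nat) (f : Nat → Int × Int) :
    pvInner (pvCanon M f) r =
      pvCanon (max M r.length)
        (fun c => if c < r.length then pvStep (pvExt f M c) (PySem.List.pyGetD r (c : Int) 0) else f c) := by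
  exact pvInner_aux r r.length M f

theorem pvCol_isSome_of_some (c : Nat) (rows : List (List Int)) (p : Int × Int) :
    (pvCol c rows (some p)).isSome := by
  induction rows generalizing p with
  | nil => simp [pvCol]
  | cons r t ih =>
    simp only [pvCol, List.foldl_cons]
    split <;> exact ih _

theorem pvCol_isSome_of_mem (c : Nat) (rows : List (List Int)) (st : Option (Int × Int))
    (h : ∃ r ∈ rows, c < r.length) : (pvCol c rows st).isSome := by
  induction rows generalizing st with
  | nil => simp at h
  | cons r t ih =>
    simp only [pvCol, List.foldl_cons]
    by_cases hc : c < r.length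
    · simp only [hc, if_pos]
      exact pvCol_isSome_of_some c t _
    · simp only [hc, if_neg, not_false_iff]
      rcases h with ⟨r', hr', hlen⟩
      rcases List.mem_cons.mp hr' with h1 | h2
      · exact absurd (h1 ▸ hlen) hc
      · exact ih st ⟨r', h2, hlen⟩

theorem pvMaxLen_mem (c : Nat) (rows : List (List Int)) (h : c < pvMaxLen rows) :
    ∃ r ∈ rows, c < r.length := by
  induction rows with
  | nil => simp [pvMaxLen] at h
  | cons r t ih =>
    simp only [pvMaxLen, lt_sup_iff] at h
    rcases h with h | h
    · exact ⟨r, List.mem_cons_self, h⟩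
    · rcases ih h with ⟨r', hr', hl⟩
      exact ⟨r', List.mem_cons_of_mem _ hr', hl⟩

theorem pvFoldA_canon (rows : List (List Int)) (M : Nat) (f : Nat → Int × Int) :
    rows.foldl pvInner (pvCanon M f) =
      pvCanon (max M (pvMaxLen rows)) (fun c => (pvCol c rows (pvExt f M c)).getD (f c)) := by
  induction rows generalizing M f with
  | nil =>
    simp only [List.foldl_nil, pvMaxLen, Nat.max_zero]
    apply pvCanon_congr
    intro c hc
    simp [pvCol, pvExt, hc]
  | cons r t ih =>
    simp only [List.foldl_cons]
    rw [pvInner_canon, ih]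
    have hM : max (max M r.length) (pvMaxLen t) = max M (pvMaxLen (r :: t)) := by
      simp only [pvMaxLen]; omega
    rw [hM]
    apply pvCanon_congr
    intro c hc
    -- the start state fed to the tail scan agrees
    have hstart : pvExt (fun c => if c < r.length then pvStep (pvExt f M c) (PySem.List.pyGetD r (c : Int) 0) else f c) (max M r.length) c
        = (if c < r.length then some (pvStep (pvExt f M c) (PySem.List.pyGetD r (c : Int) 0)) else pvExt f M c) := by
      unfold pvExt
      split_ifs <;> first | rfl | omega | (simp_all; try rw [if_neg (by omega : ¬ c < M)])
    have hcons : pvCol c (r :: t) (pvExt f M c)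
        = pvCol c t (if c < r.length then some (pvStep (pvExt f M c) (PySem.List.pyGetD r (c : Int) 0)) else pvExt f M c) := by
      simp only [pvCol, List.foldl_cons]
    rw [hstart, ← hcons]
    -- both getD defaults moot: the option is some
    have hsome : (pvCol c (r :: t) (pvExt f M c)).isSome := by
      by_cases h1 : c < M
      · have : pvExt f M c = some (f c) := if_pos h1
        rw [this]; exact pvCol_isSome_of_some c _ _
      · have h2 : c < pvMaxLen (r :: t) := by
          have := hc; simp only [pvMaxLen] at *; omega
        exact pvCol_isSome_of_mem c _ _ (pvMaxLen_mem c _ h2)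
    rcases Option.isSome_iff_exists.mp hsome with ⟨p, hp⟩
    rw [hp]
    rfl

theorem pvB_conv (c : Nat) (rows : List (List Int)) (st : Option (Int × Int)) :
    rows.foldl (fun (st : Option Int × Int) r =>
        if (c : Int) < (r.length : Int) then
          match st.1 with
          | none => (some (PySem.List.pyGetD r (c : Int) 0), 1)
          | some m =>
            if m < PySem.List.pyGetD r (c : Int) 0 then (some (PySem.List.pyGetD r (c : Int) 0), st.2 + 1) else st
        else st) (pvConv st) =
      pvConv (pvCol c rows st) := by
  induction rows generalizing st with
  | nil => simp [pvCol]
  | cons r t ih =>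
    simp only [pvCol, List.foldl_cons] at *
    have hcast : ((c : Int) < (r.length : Int)) ↔ c < r.length := by exact_mod_cast Iff.rfl
    by_cases hc : c < r.length
    · rw [if_pos (hcast.mpr hc), if_pos hc]
      have : (match (pvConv st).1 with
          | none => (some (PySem.List.pyGetD r (c : Int) 0), (1:Int))
          | some m =>
            if m < PySem.List.pyGetD r (c : Int) 0 then (some (PySem.List.pyGetD r (c : Int) 0), (pvConv st).2 + 1) else pvConv st)
          = pvConv (some (pvStep st (PySem.List.pyGetD r (c : Int) 0))) := by
        cases st with
        | none => rfl
        | some p =>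
          simp only [pvConv, pvStep]
          split_ifs <;> rfl
      rw [this, ih]
    · rw [if_neg (fun h => hc (hcast.mp h)), if_neg hc]
      exact ih st

theorem pvFoldMax (t : List (List Int)) (x : Nat) :
    (t.map (fun r => (r.length : Int))).foldl max ((x : Nat) : Int) = ((max x (pvMaxLen t) : Nat) : Int) := by
  induction t generalizing x with
  | nil => simp [pvMaxLen]
  | cons r t ih =>
    simp only [List.map_cons, List.foldl_cons, pvMaxLen]
    rw [show max ((x:Nat):Int) ((r.length:Nat):Int) = (((max x r.length : Nat)):Int) by push_cast; rfl]
    rw [ih]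
    congr 1
    omega

theorem pvMaxCols_eq (array : List (List Int)) :
    ((PySem.List.max? (array.map (fun r => (r.length : Int))) (fun x => x)).getD 0) =
      (pvMaxLen array : Int) := by
  cases array with
  | nil => simp [PySem.List.max?, pvMaxLen]
  | cons r t =>
    simp only [List.map_cons]
    rw [PySem.List.max?_id_cons]
    simp only [Option.getD_some]
    rw [pvFoldMax t r.length]
    simp [pvMaxLen]

theorem numOfBuildings_eq (array : List (List Int)) :
    numOfBuildings array = numOfBuildings_alt array := by
  unfold numOfBuildings numOfBuildings_alt
  have hempty : (PySem.Dict.empty : PySem.Dict Int (Int × Int)) = pvCanon 0 (fun _ => (0, 0)) := rfl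
  have hfold : array.foldl (fun d i =>
      (PySem.List.pyRange 0 (i.length : Int) 1).foldl (fun d j =>
        match d.get? j with
        | none => d.insert j (PySem.List.pyGetD i j 0, 1)
        | some p =>
          if p.1 < PySem.List.pyGetD i j 0 then
            d.insert j (PySem.List.pyGetD i j 0, p.2 + 1)
          else d) d) (PySem.Dict.empty : PySem.Dict Int (Int × Int)) = array.foldl pvInner (pvCanon 0 (fun _ => (0, 0))) := rfl
  rw [hfold, pvFoldA_canon]
  have hM : max 0 (pvMaxLen array) = pvMaxLen array := Nat.zero_max _
  rw [hM]
  have hF : pvCanon (pvMaxLen array) (fun c => (pvCol c array (pvExt (fun _ => (0,0)) 0 c)).getD ((fun _ => ((0:Int),(0:Int))) c))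
      = pvCanon (pvMaxLen array) (fun c => (pvCol c array none).getD (0, 0)) := by
    apply pvCanon_congr
    intro c hc
    have : pvExt (fun _ => ((0:Int),(0:Int))) 0 c = none := by simp [pvExt]
    rw [this]
  rw [hF]
  rw [PySem.List.foldl_append_singleton_eq_map, List.nil_append]
  rw [pvCanon_keys, List.map_map]
  simp only [pvMaxCols_eq, PySem.List.pyRange_zero_natCast, List.map_map]
  apply List.map_congr_left
  intro c hc
  have hcM : c < pvMaxLen array := List.mem_range.mp hc
  simp only [Function.comp]
  rw [PySem.Dict.getD_eq_get?_getD, pvCanon_get?]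
  rw [if_pos (by simp [hcM])]
  simp only [Int.toNat_natCast]
  have := pvB_conv c array none
  simp only [pvConv] at this
  rw [this]
  cases h : pvCol c array none with
  | none => rfl
  | some p => rfl

-- ===== VERDICT (by name: the statement is the Claim_ definition above) =====
theorem numOfBuildings_spec : Claim_equal_numOfBuildings := by
  intro array _
  show numOfBuildings array = numOfBuildings_alt array
  exact numOfBuildings_eq array
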